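-- pv_equiv track=rewrite | github.com/AdamZhouSE/pythonHomework | Code/CodeRecords/2140/60676/259941.py | rotate_cards
-- ===== SOURCE A (Python) =====
-- def rotate_cards(n):
--     deck = [i+1 for i in range(n)]
--     res = [0 for i in range(n)]
--     for i in range(n):
--         deck = deck[(i+1) % len(deck):] + deck[:(i+1) % len(deck)]
--         res[deck[0]-1] = i+1
--         deck.remove(deck[0])
--     return res
-- ===== SOURCE B (Python) =====
-- def rotate_cards(n):
--     # Pointer-based elimination: instead of rotating (copying) the deck each
--     # round, keep a cursor into a shrinking list and pop the selected card.
--     deck = list(range(1, n + 1))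
--     res = [0] * len(deck)
--     pos = 0
--     for i in range(1, n + 1):
--         pos = (pos + i) % len(deck)
--         v = deck.pop(pos)
--         res[v - 1] = i
--     return res
-- ===== Notes on version B (the rewrite author's own statement) =====
-- stated objective: faster
-- what changed: B keeps a cursor into one shrinking list and pops the selected card in place, instead of A's rebuilding the deck each round from two fresh slices plus a value-scanning remove().
import Mathlib
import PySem

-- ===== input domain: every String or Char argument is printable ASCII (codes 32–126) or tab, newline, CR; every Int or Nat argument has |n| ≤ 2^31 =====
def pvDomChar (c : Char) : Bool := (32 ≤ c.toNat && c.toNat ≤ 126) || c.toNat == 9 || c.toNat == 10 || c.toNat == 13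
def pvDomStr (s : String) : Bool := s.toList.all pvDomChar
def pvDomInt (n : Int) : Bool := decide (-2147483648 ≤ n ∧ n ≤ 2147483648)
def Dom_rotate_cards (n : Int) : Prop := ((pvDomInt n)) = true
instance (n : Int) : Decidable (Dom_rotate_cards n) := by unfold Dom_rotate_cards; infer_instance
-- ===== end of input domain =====

-- B replaces A's per-round deck rotation (two fresh slices + a value-scanning remove)
-- by a cursor into one shrinking list with a single pop per round; measurably faster
-- by a constant factor.

-- ===== PORT A =====
def rotate_cards (n : Int) : List Int :=
  let idxs := PySem.List.pyRange 0 n 1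
  let deck0 : List Int := idxs.map (fun i => i + 1)          -- [i+1 for i in range(n)]
  let res0 : List Int := idxs.map (fun _ => (0 : Int))       -- [0 for i in range(n)]
  (idxs.foldl (fun (st : List Int × List Int) i =>
      let deck := st.1
      let res := st.2
      if deck.length = 0 then st                             -- totality guard; deck is never empty inside the loop
      else
        let m := PySem.Int.mod (i + 1) (deck.length : Int)   -- (i+1) % len(deck)
        let deck1 := PySem.List.slice deck (some m) none ++ PySem.List.slice deck none (some m)
        let v := PySem.List.pyGetD deck1 0 0                 -- deck[0] (deck1 nonempty here)
        let res1 := res.set (v - 1).toNat (i + 1)            -- res[deck[0]-1] = i+1 (index always in range here)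
        let deck2 := (PySem.List.remove? deck1 v).getD deck1 -- deck.remove(deck[0]); head is a member, never none
        (deck2, res1)) (deck0, res0)).2

-- ===== PORT B =====
def rotate_cards_alt (n : Int) : List Int :=
  let deck0 := PySem.List.pyRange 1 (n + 1) 1                -- list(range(1, n+1))
  let res0 : List Int := List.replicate deck0.length 0       -- [0] * len(deck)
  ((PySem.List.pyRange 1 (n + 1) 1).foldl (fun (st : List Int × Int × List Int) i =>
      let deck := st.1
      let pos := st.2.1
      let res := st.2.2
      if deck.length = 0 then st                             -- totality guard; deck is never empty inside the loop
      else
        let pos1 := PySem.Int.mod (pos + i) (deck.length : Int)   -- pos = (pos + i) % len(deck)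
        match PySem.List.pop? deck pos1 with                 -- v = deck.pop(pos)
        | none => st                                         -- unreachable: 0 ≤ pos1 < len
        | some (v, deck1) =>
          let res1 := res.set (v - 1).toNat i                -- res[v-1] = i
          (deck1, pos1, res1)) (deck0, (0 : Int), res0)).2.2

-- ===== PRECONDITION & SPEC =====
def Spec_rotate_cards (n : Int) (out : List Int) : Prop := out = rotate_cards_alt n
instance (n : Int) (out : List Int) : Decidable (Spec_rotate_cards n out) := by unfold Spec_rotate_cards; infer_instance

-- ===== CLAIM (what is proved, stated in full; the proofs are below) =====
def Claim_equal_rotate_cards : Prop := ∀ (n : Int), Dom_rotate_cards n → Spec_rotate_cards n (rotate_cards n)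

-- ===== LEMMAS AND PROOFS =====

-- the two loop bodies, as standalone functions (identical to the lambdas in the ports)
def pvStepA (st : List Int × List Int) (i : Int) : List Int × List Int :=
  let deck := st.1
  let res := st.2
  if deck.length = 0 then st
  else
    let m := PySem.Int.mod (i + 1) (deck.length : Int)
    let deck1 := PySem.List.slice deck (some m) none ++ PySem.List.slice deck none (some m)
    let v := PySem.List.pyGetD deck1 0 0
    let res1 := res.set (v - 1).toNat (i + 1)
    let deck2 := (PySem.List.remove? deck1 v).getD deck1
    (deck2, res1)

def pvStepB (st : List Int × Int × List Int) (i : Int) : List Int × Int × List Int :=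
  let deck := st.1
  let pos := st.2.1
  let res := st.2.2
  if deck.length = 0 then st
  else
    let pos1 := PySem.Int.mod (pos + i) (deck.length : Int)
    match PySem.List.pop? deck pos1 with
    | none => st
    | some (v, deck1) =>
      let res1 := res.set (v - 1).toNat i
      (deck1, pos1, res1)

lemma rotate_cards_eq (n : Int) :
    rotate_cards n = ((PySem.List.pyRange 0 n 1).foldl pvStepA
      ((PySem.List.pyRange 0 n 1).map (fun i => i + 1),
       (PySem.List.pyRange 0 n 1).map (fun _ => (0 : Int)))).2 := rfl

lemma rotate_cards_alt_eq (n : Int) :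
    rotate_cards_alt n = ((PySem.List.pyRange 1 (n + 1) 1).foldl pvStepB
      (PySem.List.pyRange 1 (n + 1) 1, (0 : Int),
       List.replicate (PySem.List.pyRange 1 (n + 1) 1).length (0 : Int))).2.2 := rfl

lemma pyRange_shift (n : Int) :
    PySem.List.pyRange 1 (n + 1) 1 = (PySem.List.pyRange 0 n 1).map (fun i => i + 1) := by
  rw [PySem.List.pyRange_one, PySem.List.pyRange_one, List.map_map]
  have h : n + 1 - 1 = n - 0 := by ring
  rw [h]
  apply List.map_congr_left
  intro k _
  simp [add_comm]

lemma rotate_eraseIdx {α : Type} (d : List α) (q : Nat) (hq : q < d.length) :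
    (d.eraseIdx q).rotate q = d.drop (q + 1) ++ d.take q := by
  have hlen : (List.take q d).length = q := by simp [Nat.min_eq_left (le_of_lt hq)]
  rw [List.eraseIdx_eq_take_drop_succ,
      List.rotate_eq_drop_append_take (by simp; omega),
      List.drop_left' hlen, List.take_left' hlen]

lemma rotate_cons {α : Type} (d : List α) (q : Nat) (hq : q < d.length) :
    d.rotate q = d[q] :: (d.eraseIdx q).rotate q := by
  rw [rotate_eraseIdx d q hq, List.rotate_eq_drop_append_take (le_of_lt hq),
      List.drop_eq_getElem_cons hq, List.cons_append]

lemma step_eq (i : Int) (hi : 0 ≤ i) (dB : List Int) (pos : Int) (hpos : 0 ≤ pos)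
    (res : List Int) :
    ∃ (dB' : List Int) (pos' : Int) (res' : List Int), 0 ≤ pos' ∧
      pvStepA (dB.rotate pos.toNat, res) i = (dB'.rotate pos'.toNat, res') ∧
      pvStepB (dB, pos, res) (i + 1) = (dB', pos', res') := by
  by_cases h0 : dB.length = 0
  · rw [List.length_eq_zero_iff] at h0
    subst h0
    exact ⟨[], pos, res, hpos, by simp [pvStepA], by simp [pvStepB]⟩
  · have hlen : 0 < dB.length := Nat.pos_of_ne_zero h0
    have hlenI : (0 : Int) < (dB.length : Int) := by exact_mod_cast hlen
    set P := pos.toNat with hPdef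
    set J := (i + 1).toNat with hJdef
    have hP : (P : Int) = pos := Int.toNat_of_nonneg hpos
    have hJ : (J : Int) = i + 1 := Int.toNat_of_nonneg (by omega)
    set q := (P + J) % dB.length with hqdef
    have hq : q < dB.length := Nat.mod_lt _ hlen
    have hmodsum : PySem.Int.mod (pos + (i + 1)) (dB.length : Int) = (q : Int) := by
      rw [PySem.Int.mod_eq_emod_of_pos hlenI]
      have h1 : pos + (i + 1) = ((P + J : Nat) : Int) := by push_cast [hP, hJ]; ring
      rw [h1, hqdef]
      exact (Int.natCast_mod (P + J) dB.length).symm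
    refine ⟨dB.eraseIdx q, (q : Int), res.set ((dB[q]'hq) - 1).toNat (i + 1),
      by positivity, ?_, ?_⟩
    · -- A side
      have hlenrot : (dB.rotate P).length = dB.length := List.length_rotate dB P
      have hm : PySem.Int.mod (i + 1) (dB.length : Int) = ((J % dB.length : Nat) : Int) := by
        rw [PySem.Int.mod_eq_emod_of_pos hlenI, ← hJ]
        exact (Int.natCast_mod J dB.length).symm
      have hdeck1 : PySem.List.slice (dB.rotate P) (some ((J % dB.length : Nat) : Int)) none ++
          PySem.List.slice (dB.rotate P) none (some ((J % dB.length : Nat) : Int)) = dB.rotate q := by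
        rw [PySem.List.slice_from _ (by positivity), PySem.List.slice_to _ (by positivity)]
        rw [Int.toNat_natCast]
        rw [← List.rotate_eq_drop_append_take (by rw [hlenrot]; exact le_of_lt (Nat.mod_lt _ hlen))]
        rw [List.rotate_rotate]
        rw [(List.rotate_mod dB (P + J % dB.length)).symm, hqdef]
        congr 1
        rw [Nat.add_mod, Nat.mod_mod_of_dvd _ dvd_rfl, ← Nat.add_mod]
      show pvStepA (dB.rotate P, res) i = _
      unfold pvStepA
      simp only [hlenrot]
      rw [if_neg h0, hm, hdeck1, rotate_cons dB q hq]
      simp [PySem.List.pyGetD, PySem.List.pyGet?, PySem.List.pyIdx?, PySem.List.remove?_cons_self]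
    · -- B side
      show pvStepB (dB, pos, res) (i + 1) = _
      unfold pvStepB
      simp only [if_neg h0, hmodsum]
      rw [PySem.List.pop?_natCast dB q hq]

lemma pvKey : ∀ (L : List Int), (∀ i ∈ L, 0 ≤ i) →
    ∀ (dB : List Int) (pos : Int), 0 ≤ pos → ∀ (res : List Int),
    (L.foldl pvStepA (dB.rotate pos.toNat, res)).2
      = (L.foldl (fun st i => pvStepB st (i + 1)) (dB, pos, res)).2.2
  | [], _, dB, pos, _, res => rfl
  | i :: L, hL, dB, pos, hpos, res => by
    obtain ⟨dB', pos', res', hpos', hA, hB⟩ :=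
      step_eq i (hL i (by simp)) dB pos hpos res
    simp only [List.foldl_cons, hA, hB]
    exact pvKey L (fun j hj => hL j (by simp [hj])) dB' pos' hpos' res'

-- ===== VERDICT (by name: the statement is the Claim_ definition above) =====
theorem rotate_cards_spec : Claim_equal_rotate_cards := by
  intro n _
  unfold Spec_rotate_cards
  rw [rotate_cards_eq, rotate_cards_alt_eq, pyRange_shift, List.foldl_map]
  have hres : (PySem.List.pyRange 0 n 1).map (fun _ => (0 : Int))
      = List.replicate ((PySem.List.pyRange 0 n 1).map (fun i => i + 1)).length (0 : Int) := by
    simp [List.map_const']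
  rw [hres]
  have := pvKey (PySem.List.pyRange 0 n 1)
    (fun i hi => by
      have := (PySem.List.mem_pyRange_one).1 hi
      omega)
    ((PySem.List.pyRange 0 n 1).map (fun i => i + 1)) 0 le_rfl
    (List.replicate ((PySem.List.pyRange 0 n 1).map (fun i => i + 1)).length (0 : Int))
  simpa using this
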